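-- pv_equiv track=rewrite | github.com/mayamelissa15/Micro-Hack | server/app/teams.py | select_teams
-- ===== SOURCE A (Python) =====
-- def select_teams(individuals, required_skills):
--     selected_team = []
--     for individual in individuals:
--         meets_requirements = all(
--             individual['skills'].get(skill, 0) >= level
--             for skill, level in required_skills.items()
--         )
--         if meets_requirements:
--             selected_team.append(individual)
--     return selected_team
-- ===== SOURCE B (Python) =====
-- def select_teams(individuals, required_skills):
--     # Index-set approach: intersect, per required skill, the set of indices of
--     # individuals meeting it; reassemble the result by sorted surviving indices.
--     ok = set(range(len(individuals)))
--     for skill, level in required_skills.items():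
--         ok &= {i for i, ind in enumerate(individuals)
--                if ind['skills'].get(skill, 0) >= level}
--     return [individuals[i] for i in sorted(ok)]
-- ===== Notes on version B (the rewrite author's own statement) =====
-- stated objective: alternative
-- what changed: B computes, for each required skill, the set of indices of individuals meeting it, intersects these index sets, and rebuilds the output from the sorted surviving indices, instead of A's single pass over individuals with an inner all() over the requirements; same O(n*k) cost, different maintained state (index sets under intersection vs a per-individual boolean).
import Mathlib
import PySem

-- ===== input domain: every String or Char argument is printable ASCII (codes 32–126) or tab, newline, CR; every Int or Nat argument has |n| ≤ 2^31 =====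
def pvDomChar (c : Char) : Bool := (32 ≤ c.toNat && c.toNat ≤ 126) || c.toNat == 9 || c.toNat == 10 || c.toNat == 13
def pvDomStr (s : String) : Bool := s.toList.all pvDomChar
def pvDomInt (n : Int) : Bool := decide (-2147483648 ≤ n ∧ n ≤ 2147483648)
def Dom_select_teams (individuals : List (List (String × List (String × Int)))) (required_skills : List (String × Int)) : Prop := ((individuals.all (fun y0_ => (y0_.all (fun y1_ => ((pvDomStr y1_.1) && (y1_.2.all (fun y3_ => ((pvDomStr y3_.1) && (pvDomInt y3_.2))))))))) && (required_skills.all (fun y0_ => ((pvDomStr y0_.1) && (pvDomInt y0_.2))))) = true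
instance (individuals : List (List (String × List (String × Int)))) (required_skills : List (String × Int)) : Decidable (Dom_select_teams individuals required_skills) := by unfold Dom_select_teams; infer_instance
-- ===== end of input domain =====

-- B intersects per-skill index sets and rebuilds the output from the sorted surviving indices,
-- instead of A's single pass over individuals with an inner all() over the requirements
-- (alternative algorithm over different maintained state; same cost).

-- shared accessor: individual['skills'].get(skill, 0), read with getD [] for the 'skills' key
-- (the KeyError case is excluded by Pre_ below)
def pvSkillLevel (ind : List (String × List (String × Int))) (skill : String) : Int :=
  PySem.Dict.getD (PySem.Dict.mk (PySem.Dict.getD (PySem.Dict.mk ind) "skills" [])) skill 0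

-- ===== PORT A =====
-- individual['skills'] raises KeyError when the key is missing (only reached when required_skills
-- is non-empty); such inputs are excluded by Pre_, so the port reads the key with getD [].
def select_teams (individuals : List (List (String × List (String × Int)))) (required_skills : List (String × Int)) : List (List (String × List (String × Int))) :=
  individuals.foldl (fun selected_team individual =>
    if required_skills.all (fun p => pvSkillLevel individual p.1 ≥ p.2)
    then selected_team ++ [individual] else selected_team) []

-- ===== PORT B =====
def select_teams_alt (individuals : List (List (String × List (String × Int)))) (required_skills : List (String × Int)) : List (List (String × List (String × Int))) :=
  -- ok = set(range(len(individuals))); ok &= {i for i, ind in enumerate(individuals) if …}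
  let ok : PySem.Set Int := required_skills.foldl (fun ok p =>
      PySem.Set.inter ok (PySem.Set.ofList
        (((PySem.List.enumerate individuals).filter (fun q => pvSkillLevel q.2 p.1 ≥ p.2)).map (fun q => q.1))))
    (PySem.Set.ofList (PySem.List.pyRange 0 (PySem.List.len individuals)))
  -- [individuals[i] for i in sorted(ok)]  (indices are always in range; pyGetD totalises the read)
  (PySem.List.sorted ok (fun i => i)).map (fun i => PySem.List.pyGetD individuals i [])

-- ===== PRECONDITION & SPEC =====
-- Pre_ excludes exactly the inputs where the Python A raises KeyError: a non-empty
-- required_skills together with some individual lacking the 'skills' key (B raises there too).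
def Pre_select_teams (individuals : List (List (String × List (String × Int)))) (required_skills : List (String × Int)) : Prop :=
  required_skills = [] ∨ individuals.all (fun ind => (PySem.Dict.get? (PySem.Dict.mk ind) "skills").isSome)
instance (individuals : List (List (String × List (String × Int)))) (required_skills : List (String × Int)) : Decidable (Pre_select_teams individuals required_skills) := by unfold Pre_select_teams; infer_instance
def pvWitness_select_teams : (List (List (String × List (String × Int)))) × (List (String × Int)) :=
  ([[("skills", [("py", 3)])], [("skills", [])]], [("py", 2)])
def Spec_select_teams (individuals : List (List (String × List (String × Int)))) (required_skills : List (String × Int)) (out : List (List (String × List (String × Int)))) : Prop := out = select_teams_alt individuals required_skills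
instance (individuals : List (List (String × List (String × Int)))) (required_skills : List (String × Int)) (out : List (List (String × List (String × Int)))) : Decidable (Spec_select_teams individuals required_skills out) := by unfold Spec_select_teams; infer_instance

-- ===== CLAIM (what is proved, stated in full; the proofs are below) =====
def Claim_equal_select_teams : Prop := ∀ (individuals : List (List (String × List (String × Int)))) (required_skills : List (String × Int)), Dom_select_teams individuals required_skills → Pre_select_teams individuals required_skills → Spec_select_teams individuals required_skills (select_teams individuals required_skills)

-- ===== LEMMAS AND PROOFS =====

-- List.all is determined by the predicate's values on the list's members
theorem all_congr_mem {α : Type} (l : List α) (p q : α → Bool) (h : ∀ a ∈ l, p a = q a) :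
    l.all p = l.all q := by
  induction l with
  | nil => rfl
  | cons a t ih =>
      simp only [List.all_cons, h a (by simp), ih (fun b hb => h b (by simp [hb]))]

-- B's fold of intersections with per-skill index sets is one filter over the initial index list
-- whose test is the conjunction over all requirements.
theorem foldl_inter_eq_filter_all {α β : Type} [DecidableEq α] (g : β → List α) (reqs : List β) (xs : List α) :
    reqs.foldl (fun cand p => PySem.Set.inter cand (g p)) xs
      = xs.filter (fun x => reqs.all (fun p => (g p).contains x)) := by
  induction reqs generalizing xs with
  | nil => simp
  | cons p ps ih =>
      rw [List.foldl_cons, ih]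
      simp only [PySem.Set.inter, List.filter_filter]
      exact List.filter_congr (by intro x _; simp [List.all_cons, Bool.and_comm])

-- the per-skill index list in B is the initial index range filtered by that skill's test
theorem skill_index_list_eq (individuals : List (List (String × List (String × Int)))) (p : String × Int) :
    ((PySem.List.enumerate individuals).filter (fun q => pvSkillLevel q.2 p.1 ≥ p.2)).map (fun q => q.1)
      = (PySem.List.pyRange 0 (PySem.List.len individuals)).filter
          (fun j => pvSkillLevel (PySem.List.pyGetD individuals j []) p.1 ≥ p.2) := by
  rw [PySem.List.enumerate_eq_map_pyRange individuals []]
  rw [List.filter_map, List.map_map]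
  simp [Function.comp_def]

-- reading back a filtered index range (over Nat getD) yields the filtered list itself
theorem map_getD_filter_range {α : Type} (P : α → Bool) (d : α) (xs : List α) :
    ((List.range xs.length).filter (fun k => P (xs.getD k d))).map (fun k => xs.getD k d)
      = xs.filter P := by
  induction xs using List.reverseRecOn with
  | nil => simp
  | append_singleton ys y ih =>
      have hlt : ∀ k, k < ys.length → (ys ++ [y]).getD k d = ys.getD k d := by
        intro k hk; simp [List.getD, List.getElem?_append_left hk]
      rw [List.length_append, List.length_singleton, List.range_succ,
          List.filter_append, List.map_append, List.filter_append]
      congr 1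
      · rw [List.filter_congr (fun k hk => by rw [hlt k (List.mem_range.mp hk)]),
            List.map_congr_left
              (fun k hk => hlt k (List.mem_range.mp (List.mem_filter.mp hk).1)),
            ih]
      · rcases h : P y <;> simp [List.getD, h]

-- the same statement over Python indexing of the Int range
theorem map_pyGetD_filter_pyRange {α : Type} (xs : List α) (d : α) (P : α → Bool) :
    ((PySem.List.pyRange 0 (PySem.List.len xs)).filter (fun i => P (PySem.List.pyGetD xs i d))).map
        (fun i => PySem.List.pyGetD xs i d)
      = xs.filter P := by
  have hlen : PySem.List.len xs = ((xs.length : Nat) : Int) := by simp [PySem.List.len_eq]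
  rw [hlen, PySem.List.pyRange_zero_natCast, List.filter_map, List.map_map]
  simp only [Function.comp_def, PySem.List.pyGetD_natCast]
  exact map_getD_filter_range P d xs

-- for an index x of the initial range, membership in B's per-skill index set is that skill's test
theorem contains_eq_test (individuals : List (List (String × List (String × Int)))) (p : String × Int)
    (x : Int) (hx : x ∈ PySem.List.pyRange 0 (PySem.List.len individuals)) :
    (List.contains (PySem.Set.ofList ((PySem.List.pyRange 0 (PySem.List.len individuals)).filter
        (fun j => decide (pvSkillLevel (PySem.List.pyGetD individuals j []) p.1 ≥ p.2)))) x)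
      = decide (pvSkillLevel (PySem.List.pyGetD individuals x []) p.1 ≥ p.2) := by
  have hx' : 0 ≤ x ∧ x < (individuals.length : Int) := by
    have hb := PySem.List.mem_pyRange_one.mp hx
    simpa [PySem.List.len_eq] using hb
  by_cases h : pvSkillLevel (PySem.List.pyGetD individuals x []) p.1 ≥ p.2 <;>
    simp [PySem.Set.mem_ofList, List.mem_filter, h, hx'.1, hx'.2]

-- ===== VERDICT (by name: the statement is the Claim_ definition above) =====
theorem select_teams_spec : Claim_equal_select_teams := by
  intro individuals required_skills _ _
  unfold Spec_select_teams select_teams select_teams_alt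
  rw [PySem.List.foldl_append_if_eq_filter]
  simp only [List.nil_append, skill_index_list_eq]
  rw [foldl_inter_eq_filter_all,
      PySem.Set.ofList_eq_self_of_nodup _ (PySem.List.nodup_pyRange_one 0 _),
      List.filter_congr (fun x hx => all_congr_mem required_skills _ _
        (fun p _ => contains_eq_test individuals p x hx)),
      PySem.List.sorted_eq_of_perm_of_pairwise_lt _ _ _ (List.Perm.refl _)
        ((PySem.List.pairwise_lt_pyRange_one 0 _).sublist List.filter_sublist),
      map_pyGetD_filter_pyRange individuals []
        (fun ind => required_skills.all (fun p => decide (pvSkillLevel ind p.1 ≥ p.2)))]
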